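-- pv_equiv track=rewrite | github.com/911samuel/SignLearn | backend/data/validate.py | build_class_distribution
-- ===== SOURCE A (Python) =====
-- from collections import defaultdict
--
-- def build_class_distribution(
--     data: dict[str, list],
-- ) -> dict[str, dict[str, int]]:
--     """Return {split: {vocab_label: count}} for all splits."""
--     dist: dict[str, dict[str, int]] = {}
--     for split, entries in data.items():
--         counts: dict[str, int] = defaultdict(int)
--         for _, label, _ in entries:
--             counts[label] += 1
--         dist[split] = dict(sorted(counts.items()))
--     return dist
-- ===== SOURCE B (Python) =====
-- def build_class_distribution(
--     data: dict[str, list],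
-- ) -> dict[str, dict[str, int]]:
--     """Return {split: {vocab_label: count}} for all splits."""
--     dist: dict[str, dict[str, int]] = {}
--     for split, entries in data.items():
--         rest = sorted(label for _, label, _ in entries)
--         grouped: dict[str, int] = {}
--         while rest:
--             label = rest[0]
--             run = 1
--             while run < len(rest) and rest[run] == label:
--                 run += 1
--             grouped[label] = run
--             rest = rest[run:]
--         dist[split] = grouped
--     return dist
-- ===== Notes on version B (the rewrite author's own statement) =====
-- stated objective: alternative
-- what changed: Replaces A's per-split hash counting (defaultdict increment) followed by sorting the counts dict's items with sorting the extracted labels first and then counting consecutive equal runs in one scan; the sorted order comes from sorting the labels themselves rather than the (key,count) tuples.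
import Mathlib
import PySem

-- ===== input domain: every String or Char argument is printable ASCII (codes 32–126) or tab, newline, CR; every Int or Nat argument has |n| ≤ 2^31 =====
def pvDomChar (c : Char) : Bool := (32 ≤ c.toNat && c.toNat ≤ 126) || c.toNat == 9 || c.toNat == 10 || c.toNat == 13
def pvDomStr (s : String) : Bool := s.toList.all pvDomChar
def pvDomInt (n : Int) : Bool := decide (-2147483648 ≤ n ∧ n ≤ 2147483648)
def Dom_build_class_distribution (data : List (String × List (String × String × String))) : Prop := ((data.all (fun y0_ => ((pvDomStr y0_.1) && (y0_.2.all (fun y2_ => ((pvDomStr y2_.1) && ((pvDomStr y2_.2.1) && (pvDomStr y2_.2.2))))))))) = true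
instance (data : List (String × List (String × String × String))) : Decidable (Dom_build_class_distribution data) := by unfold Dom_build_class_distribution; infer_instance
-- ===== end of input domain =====

-- B replaces A's per-split hash-count-then-sort-the-counts-items by sort-the-labels-then-count-consecutive-runs (alternative algorithm, same results).


-- ===== PORT A =====
-- dist : Dict split -> inner counts Dict; rendered per the type convention as items lists at the end
def build_class_distribution (data : List (String × List (String × String × String))) : List (String × List (String × Int)) :=
  let dist : PySem.Dict String (PySem.Dict String Int) :=
    data.foldl (fun dist se =>
      let counts : PySem.Dict String Int :=
        se.2.foldl (fun counts e => counts.modify e.2.1 0 (· + 1)) PySem.Dict.empty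
      dist.insert se.1 (PySem.Dict.ofList (PySem.List.sorted2 counts.items (fun p => p.1) (fun p => p.2))))
      PySem.Dict.empty
  dist.items.map (fun p => (p.1, p.2.items))

-- ===== PORT B =====
-- the 'while rest:' loop of Source B: record the run of equal labels at the front, continue on the rest
def pvGroupRuns (grouped : PySem.Dict String Int) (rest : List String) : PySem.Dict String Int :=
  match rest with
  | [] => grouped
  | label :: tl =>
    pvGroupRuns (grouped.insert label (1 + ((tl.takeWhile (fun x => x == label)).length : Int)))
      (tl.dropWhile (fun x => x == label))
termination_by rest.length
decreasing_by simp only [List.length_cons]; exact Nat.lt_succ_of_le (List.length_dropWhile_le _ _)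

def build_class_distribution_alt (data : List (String × List (String × String × String))) : List (String × List (String × Int)) :=
  let dist : PySem.Dict String (PySem.Dict String Int) :=
    data.foldl (fun dist se =>
      dist.insert se.1
        (pvGroupRuns PySem.Dict.empty
          (PySem.List.sorted (se.2.map (fun e => e.2.1)) (fun x => x))))
      PySem.Dict.empty
  dist.items.map (fun p => (p.1, p.2.items))

-- ===== PRECONDITION & SPEC =====
def Spec_build_class_distribution (data : List (String × List (String × String × String))) (out : List (String × List (String × Int))) : Prop := out = build_class_distribution_alt data
instance (data : List (String × List (String × String × String))) (out : List (String × List (String × Int))) : Decidable (Spec_build_class_distribution data out) := by unfold Spec_build_class_distribution; infer_instance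

-- ===== CLAIM (what is proved, stated in full; the proofs are below) =====
def Claim_equal_build_class_distribution : Prop := ∀ (data : List (String × List (String × String × String))), Dom_build_class_distribution data → Spec_build_class_distribution data (build_class_distribution data)

-- ===== LEMMAS AND PROOFS =====

-- pure run list of a (sorted) label list: the items pvGroupRuns appends
def pvG (s : List String) : List (String × Int) :=
  match s with
  | [] => []
  | label :: tl =>
    (label, 1 + ((tl.takeWhile (fun x => x == label)).length : Int)) :: pvG (tl.dropWhile (fun x => x == label))
termination_by s.length
decreasing_by simp only [List.length_cons]; exact Nat.lt_succ_of_le (List.length_dropWhile_le _ _)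

-- everything after the run of x's in a sorted list is strictly above x
lemma pv_lt_of_mem_dropWhile (x : String) (l : List String)
    (hle : ∀ y ∈ l, x ≤ y) (hp : l.Pairwise (· ≤ ·)) :
    ∀ y ∈ l.dropWhile (fun z => z == x), x < y := by
  induction l with
  | nil => simp
  | cons a as ih =>
    by_cases hax : (a == x) = true
    · rw [show List.dropWhile (fun z => z == x) (a :: as) = List.dropWhile (fun z => z == x) as from
        List.dropWhile_cons_of_pos hax]
      exact ih (fun y hy => hle y (List.mem_cons_of_mem _ hy)) hp.tail
    · rw [show List.dropWhile (fun z => z == x) (a :: as) = a :: as from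
        List.dropWhile_cons_of_neg (by simpa using hax)]
      intro y hy
      have hxa : x < a := lt_of_le_of_ne (hle a (List.mem_cons_self ..)) (fun h => hax (by simp [h.symm]))
      rcases List.mem_cons.1 hy with rfl | hy
      · exact hxa
      · exact lt_of_lt_of_le hxa ((List.pairwise_cons.1 hp).1 y hy)

-- the run scan of a sorted list: keys are its distinct labels in strictly increasing order, values its counts
lemma pvG_spec (s : List String) (hs : s.Pairwise (· ≤ ·)) :
    ((pvG s).map Prod.fst).Nodup ∧
    (∀ k, k ∈ (pvG s).map Prod.fst ↔ k ∈ s) ∧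
    (pvG s).Pairwise (fun a b => a.1 < b.1) ∧
    (∀ p ∈ pvG s, p.2 = (s.count p.1 : Int)) := by
  induction s using pvG.induct with
  | case1 => simp [pvG]
  | case2 label tl ih =>
    set t := tl.takeWhile (fun x => x == label) with htdef
    set d := tl.dropWhile (fun x => x == label) with hddef
    have hle : ∀ y ∈ tl, label ≤ y := (List.pairwise_cons.1 hs).1
    have ht : ∀ y ∈ t, y = label := fun y hy => by
      have := List.mem_takeWhile_imp hy; simpa using this
    have hd : ∀ y ∈ d, label < y := pv_lt_of_mem_dropWhile label tl hle hs.tail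
    have hdp : d.Pairwise (· ≤ ·) := List.Pairwise.sublist (List.dropWhile_sublist _) hs.tail
    obtain ⟨ind, imem, ipw, icnt⟩ := ih hdp
    have hsplit : t ++ d = tl := List.takeWhile_append_dropWhile
    have hkeysd : ∀ k ∈ (pvG d).map Prod.fst, k ∈ d := fun k hk => (imem k).1 hk
    have hG : pvG (label :: tl) = (label, 1 + (t.length : Int)) :: pvG d := by
      rw [pvG]
    have hcount_t : ∀ k, k ≠ label → t.count k = 0 := fun k hk =>
      List.count_eq_zero.2 (fun hmem => hk (ht k hmem))
    have hcount_tl : t.count label = t.length := List.count_eq_length.2 (fun b hb => (ht b hb).symm)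
    have hcount_d0 : d.count label = 0 := List.count_eq_zero.2 (fun hmem => absurd (hd label hmem) (lt_irrefl _))
    refine ⟨?_, ?_, ?_, ?_⟩
    · rw [hG]; simp only [List.map_cons]
      refine List.nodup_cons.2 ⟨?_, ind⟩
      intro hmem
      exact absurd (hd label (hkeysd label hmem)) (lt_irrefl _)
    · intro k
      rw [hG]; simp only [List.map_cons, List.mem_cons, imem k]
      constructor
      · rintro (rfl | hk)
        · exact Or.inl rfl
        · exact Or.inr (by rw [← hsplit]; exact List.mem_append_right _ hk)
      · rintro (rfl | hk)
        · exact Or.inl rfl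
        · rw [← hsplit] at hk
          rcases List.mem_append.1 hk with hk | hk
          · exact Or.inl (ht k hk)
          · exact Or.inr hk
    · rw [hG]
      refine List.pairwise_cons.2 ⟨?_, ipw⟩
      intro p hp
      exact hd p.1 (hkeysd p.1 (List.mem_map_of_mem hp))
    · rw [hG]
      intro p hp
      rcases List.mem_cons.1 hp with rfl | hp
      · simp only []
        rw [← hsplit]
        rw [List.count_cons_self, List.count_append, hcount_tl, hcount_d0]
        push_cast; ring
      · have hpk : p.1 ∈ d := hkeysd p.1 (List.mem_map_of_mem hp)
        have hne : p.1 ≠ label := fun h => absurd (hd p.1 hpk) (by rw [h]; exact lt_irrefl _)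
        rw [icnt p hp, ← hsplit]
        simp [List.count_append, hcount_t p.1 hne, Ne.symm hne]

-- pvGroupRuns appends exactly the run list to the accumulated dict (fresh, sorted input)
lemma pvGroupRuns_items (s : List String) (grouped : PySem.Dict String Int)
    (hs : s.Pairwise (· ≤ ·)) (hfresh : ∀ k ∈ s, grouped.contains k = false) :
    (pvGroupRuns grouped s).items = grouped.items ++ pvG s := by
  induction s using pvG.induct generalizing grouped with
  | case1 => simp [pvGroupRuns, pvG]
  | case2 label tl ih =>
    have hd : ∀ y ∈ tl.dropWhile (fun x => x == label), label < y :=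
      pv_lt_of_mem_dropWhile label tl (List.pairwise_cons.1 hs).1 hs.tail
    have hdp : (tl.dropWhile (fun x => x == label)).Pairwise (· ≤ ·) :=
      List.Pairwise.sublist (List.dropWhile_sublist _) hs.tail
    rw [pvGroupRuns, pvG]
    rw [ih _ hdp ?fresh]
    · rw [PySem.Dict.items_insert_of_not_contains _ _ (hfresh label (List.mem_cons_self ..))]
      simp
    case fresh =>
      intro k hk
      rw [PySem.Dict.contains_insert]
      have h1 : (k == label) = false := by
        simpa using fun h => absurd (hd k hk) (by rw [h]; exact lt_irrefl _)
      have h2 : grouped.contains k = false := by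
        refine hfresh k (List.mem_cons_of_mem _ ?_)
        exact (List.dropWhile_sublist _).mem hk
      simp [h1, h2]

lemma pv_insertBy_congr (f g : (String × Int) → (String × Int) → Bool) (x : String × Int)
    (ys : List (String × Int)) (h : ∀ y ∈ ys, f x y = g x y) :
    PySem.List.insertBy f x ys = PySem.List.insertBy g x ys := by
  induction ys with
  | nil => rfl
  | cons y ys ih =>
    simp only [PySem.List.insertBy]
    rw [h y (List.mem_cons_self ..)]
    by_cases hb : g x y = true
    · simp [hb]
    · simp only [eq_false_of_ne_true hb, if_neg Bool.false_ne_true]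
      rw [ih (fun z hz => h z (List.mem_cons_of_mem _ hz))]

lemma pv_foldl_insertBy_congr (f g : (String × Int) → (String × Int) → Bool)
    (univ : List (String × Int)) (h : ∀ a ∈ univ, ∀ b ∈ univ, f a b = g a b) :
    ∀ (xs acc : List (String × Int)), (∀ a ∈ xs, a ∈ univ) → (∀ a ∈ acc, a ∈ univ) →
      xs.foldl (fun acc x => PySem.List.insertBy f x acc) acc
        = xs.foldl (fun acc x => PySem.List.insertBy g x acc) acc := by
  intro xs
  induction xs with
  | nil => intros; rfl
  | cons x xs ih =>
    intro acc hxs hacc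
    have hx : x ∈ univ := hxs x (List.mem_cons_self ..)
    simp only [List.foldl_cons]
    rw [pv_insertBy_congr f g x acc (fun y hy => h x hx y (hacc y hy))]
    refine ih _ (fun a ha => hxs a (List.mem_cons_of_mem _ ha)) ?_
    intro a ha
    rcases (PySem.List.insertBy_mem_iff _ _ _ _).1 ha with rfl | ha
    · exact hx
    · exact hacc a ha

-- Python's tuple sort of the (key, count) items collapses to a sort by key when keys determine the pairs
lemma pv_sorted2_eq_sorted_fst (xs : List (String × Int))
    (hinj : ∀ a ∈ xs, ∀ b ∈ xs, a.1 = b.1 → a = b) :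
    PySem.List.sorted2 xs (fun p => p.1) (fun p => p.2) = PySem.List.sorted xs (fun p => p.1) := by
  show xs.foldl (fun acc x => PySem.List.insertBy _ x acc) [] = xs.foldl (fun acc x => PySem.List.insertBy _ x acc) []
  refine pv_foldl_insertBy_congr _ _ xs ?_ xs [] (fun a ha => ha) (by simp)
  intro a ha b hb
  rcases lt_trichotomy a.1 b.1 with hlt | heq | hgt
  · simp [hlt, asymm hlt]
  · have : a = b := hinj a ha b hb heq
    subst this
    simp
  · simp [asymm hgt, hgt]

-- per split: A's sorted counter items = B's run scan of the sorted labels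
lemma pv_inner_eq (labels : List String) :
    PySem.List.sorted2 (PySem.Dict.counter labels).items (fun p => p.1) (fun p => p.2)
      = pvG (PySem.List.sorted labels (fun x => x)) := by
  have hitems := PySem.Dict.items_counter labels
  have hinj : ∀ a ∈ (PySem.Dict.counter labels).items, ∀ b ∈ (PySem.Dict.counter labels).items, a.1 = b.1 → a = b := by
    rw [hitems]
    intro a ha b hb hab
    obtain ⟨k, _, rfl⟩ := List.mem_map.1 ha
    obtain ⟨k', _, rfl⟩ := List.mem_map.1 hb
    simp only at hab
    subst hab; rfl
  set s := PySem.List.sorted labels (fun x => x) with hsdef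
  have hsperm : s.Perm labels := PySem.List.sorted_perm labels (fun x => x) false
  have hs : s.Pairwise (· ≤ ·) := PySem.List.sorted_pairwise labels (fun x => x)
  obtain ⟨ind, imem, ipw, icnt⟩ := pvG_spec s hs
  have hGid : pvG s = ((pvG s).map Prod.fst).map (fun k => (k, (labels.count k : Int))) := by
    rw [List.map_map]
    refine ((List.map_id (pvG s)).symm.trans (List.map_congr_left ?_))
    intro p hp
    have h1 := icnt p hp
    have hc : s.count p.1 = labels.count p.1 := hsperm.count_eq p.1
    simp only [Function.comp, id]
    rw [← hc, ← h1]
  have hkeysperm : ((pvG s).map Prod.fst).Perm (PySem.Set.ofList labels) := by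
    refine (List.perm_ext_iff_of_nodup ind (PySem.Set.nodup_ofList _)).2 ?_
    intro k
    rw [imem k, PySem.Set.mem_ofList]
    exact PySem.List.mem_sorted ..
  have hperm : (pvG s).Perm ((PySem.Dict.counter labels).items) := by
    rw [hitems, hGid]
    exact hkeysperm.map _
  rw [pv_sorted2_eq_sorted_fst _ hinj]
  exact PySem.List.sorted_eq_of_perm_of_pairwise_lt _ _ _ hperm ipw

lemma pv_innerDict_eq (labels : List String) :
    PySem.Dict.ofList (PySem.List.sorted2 (PySem.Dict.counter labels).items (fun p => p.1) (fun p => p.2))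
      = pvGroupRuns PySem.Dict.empty (PySem.List.sorted labels (fun x => x)) := by
  set s := PySem.List.sorted labels (fun x => x) with hsdef
  have hs : s.Pairwise (· ≤ ·) := PySem.List.sorted_pairwise labels (fun x => x)
  obtain ⟨ind, imem, ipw, icnt⟩ := pvG_spec s hs
  apply PySem.Dict.ext
  rw [pv_inner_eq labels, pvGroupRuns_items s PySem.Dict.empty hs (fun k _ => PySem.Dict.contains_empty k)]
  show (List.foldl (fun acc p => acc.insert p.1 p.2) PySem.Dict.empty (pvG s)).items = _
  rw [PySem.Dict.items_foldl_insert_fresh (pvG s) (fun p => p.1) (fun p => p.2) PySem.Dict.empty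
      (fun a _ => PySem.Dict.contains_empty _) (by simpa using ind)]
  simp

-- ===== VERDICT (by name: the statement is the Claim_ definition above) =====
theorem build_class_distribution_spec : Claim_equal_build_class_distribution := by
  intro data _hdom
  unfold Spec_build_class_distribution
  have key : ∀ (se : String × List (String × String × String)),
      PySem.Dict.ofList (PySem.List.sorted2
        ((se.2.foldl (fun counts e => counts.modify e.2.1 0 (· + 1)) PySem.Dict.empty)).items
        (fun p => p.1) (fun p => p.2))
      = pvGroupRuns PySem.Dict.empty (PySem.List.sorted (se.2.map (fun e => e.2.1)) (fun x => x)) := by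
    intro se
    have hc : se.2.foldl (fun counts e => counts.modify e.2.1 0 (· + 1)) PySem.Dict.empty
        = PySem.Dict.counter (se.2.map (fun e => e.2.1)) := by
      rw [PySem.Dict.counter_eq_foldl, List.foldl_map]
    rw [hc]
    exact pv_innerDict_eq _
  simp only [build_class_distribution, build_class_distribution_alt, key]
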